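-- pv_equiv track=rewrite | github.com/vig-alagappan/youtube-section-summaries | youtube-section-summary.py | assemble_transcript
-- ===== SOURCE A (Python) =====
-- def assemble_transcript(clean_lines) -> str:
--     paragraphs = []
--     current_paragraph = []
--     for line in clean_lines:
--         if line.startswith("###"):
--             if current_paragraph:
--                 paragraphs.append(" ".join(current_paragraph).strip())
--                 current_paragraph = []
--             paragraphs.append(line.strip())
--         else:
--             if line.strip():
--                 current_paragraph.append(line.strip())
--     if current_paragraph:
--         paragraphs.append(" ".join(current_paragraph).strip())
--     return "\n\n".join(paragraphs)
-- ===== SOURCE B (Python) =====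
-- def assemble_transcript(clean_lines) -> str:
--     # Run-based two-pointer scan: each "###" header is its own paragraph; each
--     # maximal run of non-header lines becomes one paragraph of its stripped
--     # non-blank lines (or nothing if the run is all blank).
--     paragraphs = []
--     i, n = 0, len(clean_lines)
--     while i < n:
--         if clean_lines[i].startswith("###"):
--             paragraphs.append(clean_lines[i].strip())
--             i += 1
--         else:
--             j = i
--             while j < n and not clean_lines[j].startswith("###"):
--                 j += 1
--             words = [l.strip() for l in clean_lines[i:j] if l.strip()]
--             if words:
--                 paragraphs.append(" ".join(words))
--             i = j
--     return "\n\n".join(paragraphs)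
-- ===== Notes on version B (the rewrite author's own statement) =====
-- stated objective: alternative
-- what changed: B partitions the input into maximal runs (each '###' header alone, each maximal block of non-header lines) with a two-pointer scan and maps every run to its paragraph, instead of A's per-line loop that threads a current-paragraph accumulator and flushes it at headers and at the end.
import Mathlib
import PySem

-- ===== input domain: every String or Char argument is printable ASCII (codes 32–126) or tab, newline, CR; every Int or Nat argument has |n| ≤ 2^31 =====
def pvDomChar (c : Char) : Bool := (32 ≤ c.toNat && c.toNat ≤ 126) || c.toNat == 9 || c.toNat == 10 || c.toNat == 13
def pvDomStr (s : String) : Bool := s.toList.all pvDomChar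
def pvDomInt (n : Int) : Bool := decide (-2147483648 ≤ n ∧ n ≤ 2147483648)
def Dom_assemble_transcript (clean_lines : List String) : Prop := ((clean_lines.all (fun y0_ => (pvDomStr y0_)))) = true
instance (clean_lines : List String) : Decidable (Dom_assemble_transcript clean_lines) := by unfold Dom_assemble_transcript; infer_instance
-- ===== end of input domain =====

-- B groups the lines into maximal runs (each header alone, each maximal non-header block)
-- and maps every run to its paragraph, instead of A's accumulator-flushing per-line loop;
-- objective: alternative (same cost, different decomposition).

-- ===== PORT A =====
-- the loop body of A's for-loop (state = (paragraphs, current_paragraph))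
def assemble_step (st : List String × List String) (line : String) : List String × List String :=
  if PySem.Str.startswith line "###" = true then
    ((if st.2 = [] then st.1 else st.1 ++ [PySem.Str.strip (PySem.Str.join " " st.2)])
       ++ [PySem.Str.strip line], [])
  else if PySem.Str.strip line = "" then st
  else (st.1, st.2 ++ [PySem.Str.strip line])

-- the trailing 'if current_paragraph: paragraphs.append(...)' flush
def assemble_flush (st : List String × List String) : List String :=
  if st.2 = [] then st.1 else st.1 ++ [PySem.Str.strip (PySem.Str.join " " st.2)]

def assemble_transcript (clean_lines : List String) : String :=
  PySem.Str.join "\n\n" (assemble_flush (clean_lines.foldl assemble_step ([], [])))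

-- ===== PORT B =====
-- the inner while-condition of B: a line that does not open a header
def pvNonHdr (x : String) : Bool := !(PySem.Str.startswith x "###")

-- B's outer while loop: one recursive call per run (lines[i:j] = takeWhile, lines[j:] = dropWhile)
def pvAltParas : List String → List String
  | [] => []
  | l :: rest =>
    if PySem.Str.startswith l "###" = true then
      PySem.Str.strip l :: pvAltParas rest
    else
      let words := ((l :: rest.takeWhile pvNonHdr).filter
                      (fun x => ¬ (PySem.Str.strip x = ""))).map PySem.Str.strip
      (if words = [] then [] else [PySem.Str.join " " words])
        ++ pvAltParas (rest.dropWhile pvNonHdr)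
termination_by ls => ls.length
decreasing_by
  · simp
  · exact Nat.lt_succ_of_le (List.length_dropWhile_le _ _)

def assemble_transcript_alt (clean_lines : List String) : String :=
  PySem.Str.join "\n\n" (pvAltParas clean_lines)

-- ===== PRECONDITION & SPEC =====
def Spec_assemble_transcript (clean_lines : List String) (out : String) : Prop := out = assemble_transcript_alt clean_lines
instance (clean_lines : List String) (out : String) : Decidable (Spec_assemble_transcript clean_lines out) := by unfold Spec_assemble_transcript; infer_instance

-- ===== CLAIM (what is proved, stated in full; the proofs are below) =====
def Claim_equal_assemble_transcript : Prop := ∀ (clean_lines : List String), Dom_assemble_transcript clean_lines → Spec_assemble_transcript clean_lines (assemble_transcript clean_lines)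

-- ===== LEMMAS AND PROOFS =====

-- dropWhile keeps a cons whose head refutes p
theorem pv_dropWhile_cons_neg {α : Type} (p : α → Bool) (a : α) (l : List α)
    (h : p a = false) : List.dropWhile p (a :: l) = a :: l := by
  simp [h]

-- dropWhile of equal length is the identity
theorem pv_dropWhile_eq_self {α : Type} (p : α → Bool) (l : List α)
    (h : (List.dropWhile p l).length = l.length) : List.dropWhile p l = l :=
  (List.dropWhile_suffix p).eq_of_length h

-- if dropWhile p l = l and l = a :: t then p a = false
theorem pv_head_not_of_dropWhile_self {α : Type} (p : α → Bool) (a : α) (t : List α)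
    (h : List.dropWhile p (a :: t) = a :: t) : p a = false := by
  cases hpa : p a with
  | false => rfl
  | true =>
    exfalso
    rw [List.dropWhile_cons, if_pos hpa] at h
    have hlen := congrArg List.length h
    have hle := List.length_dropWhile_le p t
    simp at hlen
    omega

-- the first element of a nonempty dropWhile fails p
theorem pv_dropWhile_head_false {α : Type} (p : α → Bool) (l : List α) (a : α) (t : List α)
    (h : List.dropWhile p l = a :: t) : p a = false := by
  induction l with
  | nil => simp at h
  | cons x xs ih =>
    rw [List.dropWhile_cons] at h
    by_cases hx : p x = true
    · rw [if_pos hx] at h; exact ih h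
    · rw [if_neg hx] at h
      cases h
      simpa using hx

-- lstrip fixes a list starting with a non-space char, even after appending
theorem pv_lstrip_append (w a : List Char) (hw : w ≠ [])
    (hl : PySem.Chars.lstrip w = w) : PySem.Chars.lstrip (w ++ a) = w ++ a := by
  cases w with
  | nil => exact absurd rfl hw
  | cons c t =>
    have hc : PySem.Chars.isspace c = false :=
      pv_head_not_of_dropWhile_self _ _ _ hl
    simp only [PySem.Chars.lstrip, List.cons_append]
    exact pv_dropWhile_cons_neg _ _ _ hc

-- rstrip fixes a list ending with a non-space char, even after prepending
theorem pv_rstrip_append (a w : List Char) (hw : w ≠ [])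
    (hr : PySem.Chars.rstrip w = w) : PySem.Chars.rstrip (a ++ w) = a ++ w := by
  have hrev : List.dropWhile PySem.Chars.isspace w.reverse = w.reverse := by
    have := congrArg List.reverse hr
    simpa [PySem.Chars.rstrip] using this
  cases hwr : w.reverse with
  | nil => exact absurd (by simpa using congrArg List.reverse hwr) hw
  | cons d t =>
    rw [hwr] at hrev
    have hd : PySem.Chars.isspace d = false :=
      pv_head_not_of_dropWhile_self _ _ _ hrev
    simp only [PySem.Chars.rstrip, List.reverse_append, hwr, List.cons_append]
    rw [pv_dropWhile_cons_neg _ _ _ hd, ← List.cons_append, ← hwr]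
    simp

-- a "clean" list: fixed by both lstrip and rstrip
def pvClean (w : List Char) : Prop :=
  PySem.Chars.lstrip w = w ∧ PySem.Chars.rstrip w = w

theorem pv_lstrip_idem (s : List Char) :
    PySem.Chars.lstrip (PySem.Chars.lstrip s) = PySem.Chars.lstrip s := by
  cases h : PySem.Chars.lstrip s with
  | nil => simp [PySem.Chars.lstrip]
  | cons a t =>
    have ha : PySem.Chars.isspace a = false :=
      pv_dropWhile_head_false _ _ _ _ h
    simp only [PySem.Chars.lstrip]
    exact pv_dropWhile_cons_neg _ _ _ ha

theorem pv_rstrip_idem (s : List Char) :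
    PySem.Chars.rstrip (PySem.Chars.rstrip s) = PySem.Chars.rstrip s := by
  simp only [PySem.Chars.rstrip, List.reverse_reverse]
  congr 1
  cases h : List.dropWhile PySem.Chars.isspace s.reverse with
  | nil => simp
  | cons a t =>
    have ha : PySem.Chars.isspace a = false :=
      pv_dropWhile_head_false _ _ _ _ h
    exact pv_dropWhile_cons_neg _ _ _ ha

theorem pv_lstrip_rstrip (s : List Char) (h : PySem.Chars.lstrip s = s) :
    PySem.Chars.lstrip (PySem.Chars.rstrip s) = PySem.Chars.rstrip s := by
  cases hr : PySem.Chars.rstrip s with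
  | nil => simp [PySem.Chars.lstrip]
  | cons a t =>
    -- rstrip s is a prefix of s, so a is s's head, which is not a space
    have hpre : PySem.Chars.rstrip s <+: s := by
      simpa [PySem.Chars.rstrip] using
        (List.reverse_prefix.mpr (List.dropWhile_suffix (l := s.reverse) PySem.Chars.isspace))
    rw [hr] at hpre
    obtain ⟨u, hu⟩ := hpre
    have hs : s = a :: (t ++ u) := by simpa using hu.symm
    rw [hs] at h
    have ha : PySem.Chars.isspace a = false :=
      pv_head_not_of_dropWhile_self _ _ _ h
    simp only [PySem.Chars.lstrip]
    exact pv_dropWhile_cons_neg _ _ _ ha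

theorem pv_clean_strip (s : List Char) : pvClean (PySem.Chars.strip s) := by
  constructor
  · exact pv_lstrip_rstrip _ (pv_lstrip_idem s)
  · exact pv_rstrip_idem _

theorem pv_strip_of_clean (w : List Char) (h : pvClean w) : PySem.Chars.strip w = w := by
  simp [PySem.Chars.strip, h.1, h.2]

-- strip is idempotent, at the String level
theorem pv_str_strip_idem (s : String) :
    PySem.Str.strip (PySem.Str.strip s) = PySem.Str.strip s := by
  apply String.toList_inj.mp
  rw [PySem.Str.toList_strip, PySem.Str.toList_strip]
  exact pv_strip_of_clean _ (pv_clean_strip s.toList)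

-- join of clean nonempty words is clean on the right
theorem pv_rstrip_join (ws : List (List Char)) (hne : ws ≠ [])
    (h : ∀ w ∈ ws, w ≠ [] ∧ pvClean w) :
    PySem.Chars.rstrip (PySem.Chars.join (" ".toList) ws) = PySem.Chars.join (" ".toList) ws := by
  induction ws with
  | nil => exact absurd rfl hne
  | cons w rest ih =>
    cases rest with
    | nil =>
      rw [PySem.Chars.join_singleton]
      exact (h w (by simp)).2.2
    | cons r rs =>
      rw [PySem.Chars.join_cons_cons]
      have hj : PySem.Chars.rstrip (PySem.Chars.join (" ".toList) (r :: rs)) =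
          PySem.Chars.join (" ".toList) (r :: rs) :=
        ih (by simp) (fun x hx => h x (List.mem_cons_of_mem _ hx))
      have hjne : PySem.Chars.join (" ".toList) (r :: rs) ≠ [] := by
        cases rs with
        | nil =>
          rw [PySem.Chars.join_singleton]
          exact (h r (by simp)).1
        | cons r' rs' =>
          rw [PySem.Chars.join_cons_cons]
          have : r ≠ [] := (h r (by simp)).1
          cases r with
          | nil => exact absurd rfl this
          | cons c t => simp
      exact pv_rstrip_append _ _ hjne hj

theorem pv_strip_join (ws : List (List Char)) (hne : ws ≠ [])
    (h : ∀ w ∈ ws, w ≠ [] ∧ pvClean w) :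
    PySem.Chars.strip (PySem.Chars.join (" ".toList) ws) = PySem.Chars.join (" ".toList) ws := by
  have hr := pv_rstrip_join ws hne h
  have hl : PySem.Chars.lstrip (PySem.Chars.join (" ".toList) ws) = PySem.Chars.join (" ".toList) ws := by
    cases ws with
    | nil => exact absurd rfl hne
    | cons w rest =>
      have hw := h w (by simp)
      cases rest with
      | nil =>
        rw [PySem.Chars.join_singleton]
        exact hw.2.1
      | cons r rs =>
        rw [PySem.Chars.join_cons_cons, List.append_assoc]
        exact pv_lstrip_append _ _ hw.1 hw.2.1
  unfold PySem.Chars.strip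
  rw [hl, hr]

-- String-level version for the lists port B builds
theorem pv_str_strip_join (ws : List String) (hne : ws ≠ [])
    (h : ∀ w ∈ ws, w ≠ "" ∧ PySem.Str.strip w = w) :
    PySem.Str.strip (PySem.Str.join " " ws) = PySem.Str.join " " ws := by
  apply String.toList_inj.mp
  rw [PySem.Str.toList_strip, PySem.Str.toList_join]
  apply pv_strip_join
  · simpa using hne
  · intro w hw
    obtain ⟨v, hv, rfl⟩ := List.mem_map.mp hw
    have hvv := h v hv
    constructor
    · intro hcon
      exact hvv.1 (String.toList_inj.mp (by simpa using hcon))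
    · have := congrArg String.toList hvv.2
      rw [PySem.Str.toList_strip] at this
      constructor
      · -- lstrip v.toList = v.toList from strip v.toList = v.toList
        have h1 : (PySem.Chars.lstrip v.toList).length = v.toList.length := by
          have hle1 : (PySem.Chars.strip v.toList).length ≤ (PySem.Chars.lstrip v.toList).length := by
            simp only [PySem.Chars.strip, PySem.Chars.rstrip]
            calc (List.dropWhile PySem.Chars.isspace (PySem.Chars.lstrip v.toList).reverse).reverse.length
                = (List.dropWhile PySem.Chars.isspace (PySem.Chars.lstrip v.toList).reverse).length := by simp
              _ ≤ (PySem.Chars.lstrip v.toList).reverse.length := List.length_dropWhile_le _ _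
              _ = (PySem.Chars.lstrip v.toList).length := by simp
          have hle2 : (PySem.Chars.lstrip v.toList).length ≤ v.toList.length :=
            List.length_dropWhile_le _ _
          rw [this] at hle1
          omega
        exact pv_dropWhile_eq_self _ _ h1
      · -- rstrip (v.toList) = v.toList similarly
        have hlf : PySem.Chars.lstrip v.toList = v.toList := by
          have h1 : (PySem.Chars.lstrip v.toList).length = v.toList.length := by
            have hle1 : (PySem.Chars.strip v.toList).length ≤ (PySem.Chars.lstrip v.toList).length := by
              simp only [PySem.Chars.strip, PySem.Chars.rstrip]
              calc (List.dropWhile PySem.Chars.isspace (PySem.Chars.lstrip v.toList).reverse).reverse.length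
                  = (List.dropWhile PySem.Chars.isspace (PySem.Chars.lstrip v.toList).reverse).length := by simp
                _ ≤ (PySem.Chars.lstrip v.toList).reverse.length := List.length_dropWhile_le _ _
                _ = (PySem.Chars.lstrip v.toList).length := by simp
            have hle2 : (PySem.Chars.lstrip v.toList).length ≤ v.toList.length :=
              List.length_dropWhile_le _ _
            rw [this] at hle1
            omega
          exact pv_dropWhile_eq_self _ _ h1
        calc PySem.Chars.rstrip v.toList
            = PySem.Chars.rstrip (PySem.Chars.lstrip v.toList) := by rw [hlf]
          _ = v.toList := this

-- every word B collects is nonempty and strip-fixed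
theorem pv_words_clean (run : List String) (w : String)
    (hw : w ∈ (run.filter (fun x => ¬ (PySem.Str.strip x = ""))).map PySem.Str.strip) :
    w ≠ "" ∧ PySem.Str.strip w = w := by
  obtain ⟨v, hv, rfl⟩ := List.mem_map.mp hw
  have := List.of_mem_filter hv
  simp at this
  exact ⟨this, pv_str_strip_idem v⟩

-- A's fold over a run of non-header lines just accumulates the stripped non-blank lines
theorem pv_fold_run (run : List String) (h : ∀ x ∈ run, pvNonHdr x = true) :
    ∀ ps cur, run.foldl assemble_step (ps, cur) =
      (ps, cur ++ (run.filter (fun x => ¬ (PySem.Str.strip x = ""))).map PySem.Str.strip) := by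
  induction run with
  | nil => intro ps cur; simp
  | cons x xs ih =>
    intro ps cur
    have hx : pvNonHdr x = true := h x (by simp)
    have hx' : ¬ (PySem.Str.startswith x "###" = true) := by
      simp [pvNonHdr] at hx; simp [hx]
    rw [List.foldl_cons]
    by_cases hb : PySem.Str.strip x = ""
    · rw [show assemble_step (ps, cur) x = (ps, cur) by
        unfold assemble_step; rw [if_neg hx', if_pos hb]]
      rw [ih (fun y hy => h y (by simp [hy])) ps cur]
      simp [hb]
    · rw [show assemble_step (ps, cur) x = (ps, cur ++ [PySem.Str.strip x]) by
        unfold assemble_step; rw [if_neg hx', if_neg hb]]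
      rw [ih (fun y hy => h y (by simp [hy])) ps (cur ++ [PySem.Str.strip x])]
      simp [hb]

-- unfolding equations for pvAltParas
theorem pvAltParas_nil : pvAltParas [] = [] := by rw [pvAltParas]

theorem pvAltParas_cons (l : String) (rest : List String) :
    pvAltParas (l :: rest) =
      if PySem.Str.startswith l "###" = true then
        PySem.Str.strip l :: pvAltParas rest
      else
        (if ((l :: rest.takeWhile pvNonHdr).filter
                (fun x => ¬ (PySem.Str.strip x = ""))).map PySem.Str.strip = [] then []
         else [PySem.Str.join " " (((l :: rest.takeWhile pvNonHdr).filter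
                (fun x => ¬ (PySem.Str.strip x = ""))).map PySem.Str.strip)])
          ++ pvAltParas (rest.dropWhile pvNonHdr) := by
  rw [pvAltParas]

-- main invariant: A's flushed fold from an empty accumulator equals B's run decomposition
theorem pv_main (n : Nat) : ∀ (lines : List String), lines.length ≤ n →
    ∀ ps, assemble_flush (lines.foldl assemble_step (ps, [])) = ps ++ pvAltParas lines := by
  induction n with
  | zero =>
    intro lines hn ps
    have hnil : lines = [] := List.eq_nil_of_length_eq_zero (Nat.le_zero.mp hn)
    subst hnil; simp [assemble_flush, pvAltParas_nil]
  | succ n ih =>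
  intro lines hn ps
  match lines with
  | [] => simp [assemble_flush, pvAltParas_nil]
  | l :: rest =>
    have hrestn : rest.length ≤ n := by simp at hn; omega
    by_cases hl : PySem.Str.startswith l "###" = true
    · rw [List.foldl_cons,
        show assemble_step (ps, []) l = (ps ++ [PySem.Str.strip l], []) by
          unfold assemble_step; rw [if_pos hl]; simp]
      rw [ih rest hrestn (ps ++ [PySem.Str.strip l])]
      rw [pvAltParas_cons, if_pos hl]
      simp
    · -- non-header head: split l :: rest into the run and the remainder
      have hl0 : PySem.Str.startswith l "###" = false := Bool.eq_false_iff.mpr hl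
      have hsplit : l :: rest =
          (l :: rest.takeWhile pvNonHdr) ++ rest.dropWhile pvNonHdr := by
        simp [List.takeWhile_append_dropWhile]
      set run := l :: rest.takeWhile pvNonHdr with hrun
      set words := (run.filter (fun x => ¬ (PySem.Str.strip x = ""))).map PySem.Str.strip
        with hwords
      have hrunh : ∀ x ∈ run, pvNonHdr x = true := by
        intro x hx
        rw [hrun] at hx
        rcases List.mem_cons.mp hx with h1 | h2
        · subst h1; simp only [pvNonHdr, hl0, Bool.not_false]
        · exact List.mem_takeWhile_imp h2
      have hwclean : ∀ w ∈ words, w ≠ "" ∧ PySem.Str.strip w = w := by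
        intro w hw; exact pv_words_clean run w (hwords ▸ hw)
      have hfold : (l :: rest).foldl assemble_step (ps, []) =
          (rest.dropWhile pvNonHdr).foldl assemble_step (ps, words) := by
        conv_lhs => rw [hsplit]
        rw [List.foldl_append, pv_fold_run run hrunh ps []]
        simp [hwords]
      rw [hfold]
      have haltB : pvAltParas (l :: rest) =
          (if words = [] then [] else [PySem.Str.join " " words])
            ++ pvAltParas (rest.dropWhile pvNonHdr) := by
        rw [pvAltParas_cons, if_neg hl]
      cases hdrop : rest.dropWhile pvNonHdr with
      | nil =>
        rw [hdrop] at haltB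
        rw [List.foldl_nil, haltB, pvAltParas_nil, List.append_nil]
        by_cases hwe : words = []
        · rw [if_pos hwe]
          show (if words = [] then ps
                else ps ++ [PySem.Str.strip (PySem.Str.join " " words)]) = ps ++ []
          rw [if_pos hwe, List.append_nil]
        · rw [if_neg hwe]
          show (if words = [] then ps
                else ps ++ [PySem.Str.strip (PySem.Str.join " " words)])
              = ps ++ [PySem.Str.join " " words]
          rw [if_neg hwe, pv_str_strip_join words hwe hwclean]
      | cons h t =>
        rw [hdrop] at haltB
        have hh : PySem.Str.startswith h "###" = true := by
          have hfalse := pv_dropWhile_head_false pvNonHdr rest h t hdrop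
          simp only [pvNonHdr] at hfalse
          simpa using hfalse
        have htn : t.length ≤ n := by
          have h1 : (rest.dropWhile pvNonHdr).length ≤ rest.length :=
            List.length_dropWhile_le _ _
          rw [hdrop] at h1
          simp at h1
          omega
        rw [List.foldl_cons,
          show assemble_step (ps, words) h =
            ((if words = [] then ps else ps ++ [PySem.Str.strip (PySem.Str.join " " words)])
              ++ [PySem.Str.strip h], []) by
            unfold assemble_step; rw [if_pos hh]]
        rw [ih t htn _]
        rw [haltB, pvAltParas_cons, if_pos hh]
        by_cases hwe : words = []
        · rw [if_pos hwe, if_pos hwe]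
          simp
        · rw [if_neg hwe, if_neg hwe, pv_str_strip_join words hwe hwclean]
          simp

-- ===== VERDICT (by name: the statement is the Claim_ definition above) =====
theorem assemble_transcript_spec : Claim_equal_assemble_transcript := by
  intro clean_lines _
  show assemble_transcript clean_lines = assemble_transcript_alt clean_lines
  unfold assemble_transcript assemble_transcript_alt
  rw [pv_main clean_lines.length clean_lines (Nat.le_refl _) []]
  rfl
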